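-- pv_equiv track=rewrite | github.com/GabrieleMaurina/citations-graph-analysis-cs535-pa1 | pa1.py | get_distances_with_bfs
-- ===== SOURCE A (Python) =====
-- from collections import deque
-- from collections import Counter
--
-- def get_distances_with_bfs(id, g):
--     d = {id: 0}
--     q = deque()
--     q.append(id)
--     while(q):
--         n = q.popleft()
--         for nn in g[n]:
--             if nn not in d:
--                 d[nn] = d[n] + 1
--                 q.append(nn)
--     del d[id]
--     return Counter(d.values()).items()
-- ===== SOURCE B (Python) =====
-- def get_distances_with_bfs(id, g):
--     visited = {id}
--     frontier = [id]
--     result = {}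
--     dist = 1
--     while frontier:
--         next_level = []
--         for n in frontier:
--             for nn in g[n]:
--                 if nn not in visited:
--                     visited.add(nn)
--                     next_level.append(nn)
--         if next_level:
--             result[dist] = len(next_level)
--         dist += 1
--         frontier = next_level
--     return result.items()
-- ===== Notes on version B (the rewrite author's own statement) =====
-- stated objective: alternative
-- what changed: Replaced A's node-at-a-time queue BFS that records a distance for every node in a dict and finally runs Counter over the dict's values by a level-synchronous BFS (visited set + frontier list) that counts each whole level directly into the result dict, so no per-node distance dict and no Counter pass exist.
import Mathlib
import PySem

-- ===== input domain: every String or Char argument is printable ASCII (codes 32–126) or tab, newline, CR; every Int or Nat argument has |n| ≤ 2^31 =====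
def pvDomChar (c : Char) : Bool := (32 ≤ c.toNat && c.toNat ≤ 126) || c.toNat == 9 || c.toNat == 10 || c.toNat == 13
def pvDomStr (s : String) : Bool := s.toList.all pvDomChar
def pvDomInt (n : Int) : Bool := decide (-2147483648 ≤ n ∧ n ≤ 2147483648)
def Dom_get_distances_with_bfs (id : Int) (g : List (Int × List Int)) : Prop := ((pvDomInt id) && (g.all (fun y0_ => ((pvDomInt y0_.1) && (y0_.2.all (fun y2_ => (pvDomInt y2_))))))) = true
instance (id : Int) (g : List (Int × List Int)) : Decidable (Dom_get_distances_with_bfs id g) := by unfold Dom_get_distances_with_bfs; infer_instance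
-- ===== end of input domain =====

-- B replaces A's node-at-a-time queue BFS + per-node distance dict + final Counter by a
-- level-synchronous BFS (visited set + frontier list) that counts each level directly; same
-- return value, a different decomposition (objective: alternative, not claimed faster).

-- ===== PORT A =====
-- A's while-queue loop; the fuel only makes the recursion structural (one unit per queue pop;
-- the chosen amount provably exceeds the number of pops, as the equivalence proof shows).
def pvBfsA (g : List (Int × List Int)) : Nat → PySem.Dict Int Int → List Int → PySem.Dict Int Int
  | _, d, [] => d
  | 0, d, _ :: _ => d
  | fuel+1, d, n :: q =>
    match (PySem.Dict.mk g).get? n with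
    | none => d    -- Python: g[n] raises KeyError here (excluded by Pre_)
    | some ns =>
      -- for nn in g[n]: if nn not in d: d[nn] = d[n] + 1; q.append(nn)
      let s := ns.foldl (fun (s : PySem.Dict Int Int × List Int) nn =>
        if s.1.contains nn then s
        else (s.1.insert nn (s.1.getD n 0 + 1), s.2 ++ [nn])) (d, q)
      pvBfsA g fuel s.1 s.2

def get_distances_with_bfs (id : Int) (g : List (Int × List Int)) : List (Int × Int) :=
  let d0 : PySem.Dict Int Int := PySem.Dict.insert PySem.Dict.empty id 0   -- d = {id: 0}
  let d := pvBfsA g ((g.map (fun p => p.2.length)).sum + 2) d0 [id]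
  (PySem.Dict.counter ((d.erase id).values)).items   -- del d[id]; Counter(d.values()).items()

-- ===== PORT B =====
-- B's while-frontier loop; fuel = one unit per level, again provably sufficient.
def pvBfsB (g : List (Int × List Int)) : Nat → PySem.Set Int → List Int → PySem.Dict Int Int → Int → PySem.Dict Int Int
  | _, _, [], res, _ => res
  | 0, _, _ :: _, res, _ => res
  | fuel+1, vis, frontier, res, dist =>
    -- for n in frontier: for nn in g[n]: if nn not in visited: visited.add(nn); next_level.append(nn)
    let s := frontier.foldl (fun (s : PySem.Set Int × List Int) n =>
      (((PySem.Dict.mk g).get? n).getD []).foldl (fun (s : PySem.Set Int × List Int) nn =>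
        if s.1.contains nn then s
        else (PySem.Set.add s.1 nn, s.2 ++ [nn])) s) (vis, [])
    let res' := if s.2.isEmpty then res else res.insert dist (s.2.length : Int)
    pvBfsB g fuel s.1 s.2 res' (dist + 1)

def get_distances_with_bfs_alt (id : Int) (g : List (Int × List Int)) : List (Int × Int) :=
  (pvBfsB g ((g.map (fun p => p.2.length)).sum + 2)
    (PySem.Set.add PySem.Set.empty id) [id] PySem.Dict.empty 1).items

-- ===== PRECONDITION & SPEC =====
-- Reachability closure of {id} in g: pvReachStep adds every neighbour of a member (a node that
-- is not a key contributes nothing); iterating it (len(flatMap)+1 times provably reaches the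
-- fixpoint, see pvReach_fix below) yields the set of nodes BFS from id ever looks up. This is a
-- property of the input graph, not a run of either port.
def pvReachStep (g : List (Int × List Int)) (r : List Int) : List Int :=
  r.foldl (fun acc n => PySem.Set.update acc (((PySem.Dict.mk g).get? n).getD [])) r

def pvReach (g : List (Int × List Int)) (id : Int) : List Int :=
  (pvReachStep g)^[(g.flatMap (fun p => p.2)).length + 1] [id]

-- A raises KeyError exactly when some node reachable from id (id itself included) is not a key
-- of g; Pre_ is that condition: every reachable node is a key.
def Pre_get_distances_with_bfs (id : Int) (g : List (Int × List Int)) : Prop :=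
  ∀ n ∈ pvReach g id, n ∈ g.map (fun p => p.1)
instance (id : Int) (g : List (Int × List Int)) : Decidable (Pre_get_distances_with_bfs id g) := by unfold Pre_get_distances_with_bfs; infer_instance

def pvWitness_get_distances_with_bfs : Int × (List (Int × List Int)) :=
  (0, [(0, [1, 2]), (1, [2, 0]), (2, [])])

def Spec_get_distances_with_bfs (id : Int) (g : List (Int × List Int)) (out : List (Int × Int)) : Prop := out = get_distances_with_bfs_alt id g
instance (id : Int) (g : List (Int × List Int)) (out : List (Int × Int)) : Decidable (Spec_get_distances_with_bfs id g out) := by unfold Spec_get_distances_with_bfs; infer_instance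

-- ===== CLAIM (what is proved, stated in full; the proofs are below) =====
def Claim_equal_get_distances_with_bfs : Prop := ∀ (id : Int) (g : List (Int × List Int)), Dom_get_distances_with_bfs id g → Pre_get_distances_with_bfs id g → Spec_get_distances_with_bfs id g (get_distances_with_bfs id g)

-- ===== LEMMAS AND PROOFS =====

-- The new nodes contributed by one adjacency list ns, scanned against `seen`.
def pvNew (seen : List Int) : List Int → List Int
  | [] => []
  | nn :: ns => if nn ∈ seen then pvNew seen ns else nn :: pvNew (seen ++ [nn]) ns

-- The new nodes contributed by a whole frontier f (in discovery order).
def pvLevel (g : List (Int × List Int)) (seen : List Int) : List Int → List Int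
  | [] => []
  | n :: f =>
    let w := pvNew seen (((PySem.Dict.mk g).get? n).getD [])
    w ++ pvLevel g (seen ++ w) f

-- number of neighbour OCCURRENCES not yet seen (the termination measure of both loops)
def pvMiss (g : List (Int × List Int)) (seen : List Int) : Nat :=
  (g.flatMap (fun p => p.2)).countP (fun v => decide (v ∉ seen))

lemma pvNew_mem : ∀ (ns seen : List Int), ∀ x ∈ pvNew seen ns, x ∈ ns ∧ x ∉ seen := by
  intro ns
  induction ns with
  | nil => intro seen x hx; simp [pvNew] at hx
  | cons nn ns ih =>
    intro seen x hx
    by_cases h : nn ∈ seen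
    · simp only [pvNew, if_pos h] at hx
      obtain ⟨h1, h2⟩ := ih seen x hx
      exact ⟨List.mem_cons_of_mem _ h1, h2⟩
    · simp only [pvNew, if_neg h] at hx
      rcases List.mem_cons.1 hx with rfl | hx'
      · exact ⟨List.mem_cons_self, h⟩
      · obtain ⟨h1, h2⟩ := ih (seen ++ [nn]) x hx'
        refine ⟨List.mem_cons_of_mem _ h1, fun hs => h2 (List.mem_append_left _ hs)⟩

lemma pvNew_nodup : ∀ (ns seen : List Int), seen.Nodup → (seen ++ pvNew seen ns).Nodup := by
  intro ns
  induction ns with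
  | nil => intro seen hs; simpa [pvNew] using hs
  | cons nn ns ih =>
    intro seen hs
    by_cases h : nn ∈ seen
    · simpa [pvNew, if_pos h] using ih seen hs
    · have h2 : (seen ++ [nn]).Nodup := by
        rw [← List.concat_eq_append]
        exact List.Nodup.concat h hs
      have := ih (seen ++ [nn]) h2
      simp only [pvNew, if_neg h]
      simpa [List.append_assoc] using this

lemma pvGet?_sub (g : List (Int × List Int)) (n : Int) :
    ∀ x ∈ ((PySem.Dict.mk g).get? n).getD [], x ∈ g.flatMap (fun p => p.2) := by
  intro x hx
  cases hf : List.find? (fun p => p.1 == n) g with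
  | none => simp [PySem.Dict.get?, hf] at hx
  | some p =>
    simp only [PySem.Dict.get?, hf, Option.map_some, Option.getD_some] at hx
    exact List.mem_flatMap.2 ⟨p, List.mem_of_find?_eq_some hf, hx⟩

lemma pvLevel_mem : ∀ (f : List Int) (g : List (Int × List Int)) (seen : List Int),
    ∀ x ∈ pvLevel g seen f, x ∈ g.flatMap (fun p => p.2) ∧ x ∉ seen := by
  intro f
  induction f with
  | nil => intro g seen x hx; simp [pvLevel] at hx
  | cons n f ih =>
    intro g seen x hx
    simp only [pvLevel] at hx
    rcases List.mem_append.1 hx with hw | hr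
    · obtain ⟨h1, h2⟩ := pvNew_mem _ _ x hw
      exact ⟨pvGet?_sub g n x h1, h2⟩
    · obtain ⟨h1, h2⟩ := ih g _ x hr
      exact ⟨h1, fun hs => h2 (List.mem_append_left _ hs)⟩

lemma pvLevel_nodup : ∀ (f : List Int) (g : List (Int × List Int)) (seen : List Int),
    seen.Nodup → (seen ++ pvLevel g seen f).Nodup := by
  intro f
  induction f with
  | nil => intro g seen hs; simpa [pvLevel] using hs
  | cons n f ih =>
    intro g seen hs
    simp only [pvLevel]
    have h1 := pvNew_nodup (((PySem.Dict.mk g).get? n).getD []) seen hs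
    have := ih g _ h1
    simpa [List.append_assoc] using this

lemma pvMiss_drop (g : List (Int × List Int)) (seen w : List Int)
    (hnd : (seen ++ w).Nodup) (hw : ∀ x ∈ w, x ∈ g.flatMap (fun p => p.2)) :
    pvMiss g (seen ++ w) + w.length ≤ pvMiss g seen := by
  have hdisj : ∀ a ∈ seen, a ∉ w := fun a ha hw' =>
    (List.disjoint_of_nodup_append hnd) ha hw'
  have key : ∀ (L : List Int), L.countP (fun v => decide (v ∉ seen))
      = L.countP (fun v => decide (v ∉ seen ++ w)) + L.countP (fun v => decide (v ∈ w)) := by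
    intro L
    induction L with
    | nil => simp
    | cons a L ihL =>
      rw [List.countP_cons, List.countP_cons, List.countP_cons, ihL]
      by_cases haw : a ∈ w <;> by_cases has : a ∈ seen
      · exact absurd haw (hdisj a has)
      all_goals (simp [haw, has]; try omega)
  have hsub : w.length ≤ (g.flatMap (fun p => p.2)).countP (fun v => decide (v ∈ w)) := by
    rw [List.countP_eq_length_filter]
    have hwnd : w.Nodup := hnd.of_append_right
    have : w ⊆ (g.flatMap (fun p => p.2)).filter (fun v => decide (v ∈ w)) := by
      intro x hx
      exact List.mem_filter.2 ⟨hw x hx, by simpa using hx⟩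
    exact List.Subperm.length_le (List.subperm_of_subset hwnd this)
  have := key (g.flatMap (fun p => p.2))
  unfold pvMiss
  omega

lemma pvLevel_mem' : ∀ (f : List Int) (g : List (Int × List Int)) (seen : List Int),
    ∀ x ∈ pvLevel g seen f, ∃ n ∈ f, x ∈ ((PySem.Dict.mk g).get? n).getD [] := by
  intro f
  induction f with
  | nil => intro g seen x hx; simp [pvLevel] at hx
  | cons n f ih =>
    intro g seen x hx
    simp only [pvLevel] at hx
    rcases List.mem_append.1 hx with hw | hr
    · exact ⟨n, List.mem_cons_self, (pvNew_mem _ _ x hw).1⟩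
    · obtain ⟨n', hn', hx'⟩ := ih g _ x hr
      exact ⟨n', List.mem_cons_of_mem _ hn', hx'⟩

lemma pvGet?_append_left (l₁ l₂ : List (Int × Int)) (x : Int) (h : x ∈ l₁.map Prod.fst) :
    (PySem.Dict.mk (l₁ ++ l₂)).get? x = (PySem.Dict.mk l₁).get? x := by
  have hsome : (List.find? (fun p => p.1 == x) l₁).isSome := by
    rw [List.find?_isSome]
    obtain ⟨p, hp, hfst⟩ := List.mem_map.1 h
    exact ⟨p, hp, by simp [hfst]⟩
  cases ho : List.find? (fun p => p.1 == x) l₁ with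
  | none => rw [ho] at hsome; simp at hsome
  | some a => simp [PySem.Dict.get?, List.find?_append, ho]

lemma pvGet?_append_right (l₁ l₂ : List (Int × Int)) (x : Int) (h : x ∉ l₁.map Prod.fst) :
    (PySem.Dict.mk (l₁ ++ l₂)).get? x = (PySem.Dict.mk l₂).get? x := by
  have hnone : List.find? (fun p => p.1 == x) l₁ = none := by
    rw [List.find?_eq_none]
    intro p hp hbeq
    exact h (List.mem_map.2 ⟨p, hp, by simpa using hbeq⟩)
  simp [PySem.Dict.get?, List.find?_append, hnone]

lemma pvGet?_const_block (w : List Int) (v x : Int) (h : x ∈ w) :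
    (PySem.Dict.mk (w.map (fun y => (y, v)))).get? x = some v := by
  induction w with
  | nil => cases h
  | cons y w ih =>
    simp only [List.map_cons]
    rw [PySem.Dict.get?_mk_cons]
    by_cases hxy : y = x
    · simp [hxy]
    · rw [if_neg (by simpa using hxy)]
      exact ih (by rcases List.mem_cons.1 h with rfl | h' <;> [exact absurd rfl hxy; exact h'])

lemma pvInnerA (ns : List Int) : ∀ (d : PySem.Dict Int Int) (acc : List Int) (n k : Int),
    n ∈ d.keys → d.getD n 0 = k →
    ns.foldl (fun (s : PySem.Dict Int Int × List Int) nn =>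
        if s.1.contains nn then s
        else (s.1.insert nn (s.1.getD n 0 + 1), s.2 ++ [nn])) (d, acc)
      = (PySem.Dict.mk (d.items ++ (pvNew d.keys ns).map (fun y => (y, k+1))), acc ++ pvNew d.keys ns) := by
  induction ns with
  | nil => intro d acc n k _ _; simp [pvNew]
  | cons nn ns ih =>
    intro d acc n k hn hv
    simp only [List.foldl_cons]
    by_cases h : nn ∈ d.keys
    · rw [if_pos (by rw [PySem.Dict.contains_eq_decide_mem_keys]; simpa using h)]
      rw [ih d acc n k hn hv]
      simp [pvNew, h]
    · rw [if_neg (by rw [PySem.Dict.contains_eq_decide_mem_keys]; simpa using h)]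
      have hcont : d.contains nn = false := by
        rw [PySem.Dict.contains_eq_decide_mem_keys]; simpa using h
      have hins : d.insert nn (d.getD n 0 + 1) = PySem.Dict.mk (d.items ++ [(nn, k+1)]) := by
        rw [hv]; simp [PySem.Dict.insert, hcont]
      have hkeys : (PySem.Dict.mk (d.items ++ [(nn, k+1)])).keys = d.keys ++ [nn] := by
        simp [PySem.Dict.keys]
      have hne : n ≠ nn := fun he => h (he ▸ hn)
      have hn' : n ∈ (PySem.Dict.mk (d.items ++ [(nn, k+1)])).keys := by
        rw [hkeys]; exact List.mem_append_left _ hn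
      have hv' : (PySem.Dict.mk (d.items ++ [(nn, k+1)])).getD n 0 = k := by
        unfold PySem.Dict.getD
        rw [pvGet?_append_left d.items [(nn, k+1)] n (by simpa [PySem.Dict.keys] using hn)]
        exact hv
      rw [hins, ih _ (acc ++ [nn]) n k hn' hv']
      rw [hkeys]
      simp only [pvNew, if_neg h]
      simp [List.append_assoc]

lemma pvInnerB (ns : List Int) : ∀ (vis acc : List Int),
    ns.foldl (fun (s : PySem.Set Int × List Int) nn =>
        if s.1.contains nn then s
        else (PySem.Set.add s.1 nn, s.2 ++ [nn])) (vis, acc)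
      = (vis ++ pvNew vis ns, acc ++ pvNew vis ns) := by
  induction ns with
  | nil => intro vis acc; simp [pvNew]
  | cons nn ns ih =>
    intro vis acc
    simp only [List.foldl_cons]
    by_cases h : nn ∈ vis
    · rw [if_pos (by simpa [PySem.Set.contains] using h)]
      rw [ih vis acc]
      simp [pvNew, h]
    · have hc : PySem.Set.contains vis nn = false := by
        simpa [PySem.Set.contains] using h
      rw [if_neg (by simp [PySem.Set.contains]; exact h)]
      have hadd : PySem.Set.add vis nn = vis ++ [nn] := by
        simp [PySem.Set.add, PySem.Set.contains, h]
      rw [hadd, ih (vis ++ [nn]) (acc ++ [nn])]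
      simp only [pvNew, if_neg h]
      simp [List.append_assoc]

lemma pvLevelB (g : List (Int × List Int)) : ∀ (f vis acc : List Int),
    f.foldl (fun (s : PySem.Set Int × List Int) n =>
      (((PySem.Dict.mk g).get? n).getD []).foldl (fun (s : PySem.Set Int × List Int) nn =>
        if s.1.contains nn then s
        else (PySem.Set.add s.1 nn, s.2 ++ [nn])) s) (vis, acc)
      = (vis ++ pvLevel g vis f, acc ++ pvLevel g vis f) := by
  intro f
  induction f with
  | nil => intro vis acc; simp [pvLevel]
  | cons n f ih =>
    intro vis acc
    simp only [List.foldl_cons]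
    rw [pvInnerB]
    rw [ih]
    simp only [pvLevel]
    simp [List.append_assoc]

lemma pvDrainA (g : List (Int × List Int)) : ∀ (f : List Int) (d : PySem.Dict Int Int) (t : List Int) (k : Int) (fa : Nat),
    (∀ n ∈ f, ((PySem.Dict.mk g).get? n).isSome ∧ n ∈ d.keys ∧ d.getD n 0 = k) →
    d.keys.Nodup →
    f.length ≤ fa →
    pvBfsA g fa d (f ++ t)
      = pvBfsA g (fa - f.length)
          (PySem.Dict.mk (d.items ++ (pvLevel g d.keys f).map (fun y => (y, k+1))))
          (t ++ pvLevel g d.keys f) := by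
  intro f
  induction f with
  | nil => intro d t k fa _ _ _; simp [pvLevel]
  | cons n f ih =>
    intro d t k fa hf hnd hlen
    obtain ⟨fa', rfl⟩ : ∃ fa', fa = fa' + 1 := ⟨fa - 1, by simp at hlen; omega⟩
    obtain ⟨hS, hK, hV⟩ := hf n List.mem_cons_self
    obtain ⟨ns, hns⟩ := Option.isSome_iff_exists.1 hS
    show pvBfsA g (fa' + 1) d (n :: (f ++ t)) = _
    rw [pvBfsA, hns]
    simp only
    rw [pvInnerA ns d (f ++ t) n k hK hV]
    set w₁ := pvNew d.keys ns with hw₁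
    set d₁ := PySem.Dict.mk (d.items ++ w₁.map (fun y => (y, k+1))) with hd₁
    have hkeys₁ : d₁.keys = d.keys ++ w₁ := by
      simp only [hd₁, PySem.Dict.keys, List.map_append]
      congr 1
      induction w₁ <;> simp_all
    have hcond : ∀ n' ∈ f, ((PySem.Dict.mk g).get? n').isSome ∧ n' ∈ d₁.keys ∧ d₁.getD n' 0 = k := by
      intro n' hn'
      obtain ⟨h1, h2, h3⟩ := hf n' (List.mem_cons_of_mem _ hn')
      refine ⟨h1, by rw [hkeys₁]; exact List.mem_append_left _ h2, ?_⟩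
      unfold PySem.Dict.getD
      rw [hd₁, pvGet?_append_left d.items _ n' (by simpa [PySem.Dict.keys] using h2)]
      exact h3
    have hnd₁ : d₁.keys.Nodup := by rw [hkeys₁]; exact pvNew_nodup ns d.keys hnd
    have := ih d₁ (t ++ w₁) k fa' hcond hnd₁ (by simp at hlen; omega)
    rw [show (f ++ t) ++ w₁ = f ++ (t ++ w₁) from List.append_assoc _ _ _, this]
    have hlvl : pvLevel g d.keys (n :: f) = w₁ ++ pvLevel g (d.keys ++ w₁) f := by
      simp [pvLevel, hns, hw₁]
    rw [hlvl, hkeys₁]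
    congr 1
    · simp only [List.length_cons]; omega
    · simp [hd₁, List.append_assoc]
    · simp [List.append_assoc]

lemma pvRep : ∀ (c : Nat) (dd : PySem.Dict Int Int) (v : Int) (j : Int),
    (List.replicate c v).foldl (fun d x => d.modify x 0 (· + 1)) (dd.insert v j)
      = dd.insert v (j + c) := by
  intro c
  induction c with
  | zero => intro dd v j; simp
  | succ c ih =>
    intro dd v j
    rw [List.replicate_succ, List.foldl_cons]
    have hstep : (dd.insert v j).modify v 0 (· + 1) = dd.insert v (j + 1) := by
      unfold PySem.Dict.modify
      rw [PySem.Dict.getD_insert_self, PySem.Dict.insert_insert_self]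
    rw [hstep, ih]
    congr 1
    push_cast
    ring

lemma pvCounterBlock (vals : List Int) (v : Int) (c : Nat) (hv : v ∉ vals) (hc : 0 < c) :
    PySem.Dict.counter (vals ++ List.replicate c v)
      = (PySem.Dict.counter vals).insert v (c : Int) := by
  obtain ⟨c', rfl⟩ : ∃ c', c = c' + 1 := ⟨c - 1, by omega⟩
  rw [show PySem.Dict.counter (vals ++ List.replicate (c' + 1) v)
      = (List.replicate (c' + 1) v).foldl (fun d x => d.modify x 0 (· + 1)) (PySem.Dict.counter vals) from by
    simp [PySem.Dict.counter, List.foldl_append]]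
  rw [List.replicate_succ, List.foldl_cons]
  have hfirst : (PySem.Dict.counter vals).modify v 0 (· + 1) = (PySem.Dict.counter vals).insert v 1 := by
    unfold PySem.Dict.modify
    rw [PySem.Dict.getD_counter]
    rw [List.count_eq_zero.2 hv]
    norm_num
  rw [hfirst, pvRep]
  congr 1
  push_cast
  ring

lemma pvMemFoldlUpdate (g : List (Int × List Int)) : ∀ (l A : List Int) (x : Int),
    x ∈ l.foldl (fun acc n => PySem.Set.update acc (((PySem.Dict.mk g).get? n).getD [])) A
      ↔ x ∈ A ∨ ∃ n ∈ l, x ∈ ((PySem.Dict.mk g).get? n).getD [] := by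
  intro l
  induction l with
  | nil => intro A x; simp
  | cons n l ih =>
    intro A x
    rw [List.foldl_cons, ih, PySem.Set.mem_update]
    constructor
    · rintro ((h | h) | ⟨m, hm, hx⟩)
      · exact Or.inl h
      · exact Or.inr ⟨n, List.mem_cons_self, h⟩
      · exact Or.inr ⟨m, List.mem_cons_of_mem _ hm, hx⟩
    · rintro (h | ⟨m, hm, hx⟩)
      · exact Or.inl (Or.inl h)
      · rcases List.mem_cons.1 hm with rfl | hm'
        · exact Or.inl (Or.inr hx)
        · exact Or.inr ⟨m, hm', hx⟩

lemma pvMemStep (g : List (Int × List Int)) (r : List Int) (x : Int) :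
    x ∈ pvReachStep g r ↔ x ∈ r ∨ ∃ n ∈ r, x ∈ ((PySem.Dict.mk g).get? n).getD [] :=
  pvMemFoldlUpdate g r r x

lemma pvFoldlGrow (g : List (Int × List Int)) : ∀ (l A : List Int),
    ∃ e, l.foldl (fun acc n => PySem.Set.update acc (((PySem.Dict.mk g).get? n).getD [])) A = A ++ e := by
  intro l
  induction l with
  | nil => intro A; exact ⟨[], by simp⟩
  | cons n l ih =>
    intro A
    rw [List.foldl_cons, PySem.Set.update_eq_append_filter]
    obtain ⟨e, he⟩ := ih (A ++ _)
    exact ⟨_, by rw [he, List.append_assoc]⟩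

lemma pvStepNodup (g : List (Int × List Int)) : ∀ (l A : List Int), A.Nodup →
    (l.foldl (fun acc n => PySem.Set.update acc (((PySem.Dict.mk g).get? n).getD [])) A).Nodup := by
  intro l
  induction l with
  | nil => intro A h; simpa
  | cons n l ih =>
    intro A h
    exact ih _ (PySem.Set.nodup_update _ _ h)

lemma pvStepGrow (g : List (Int × List Int)) (R : List Int) :
    ∃ e, pvReachStep g R = R ++ e := pvFoldlGrow g R R

lemma pvIterGrow (g : List (Int × List Int)) (id : Int) : ∀ (i : Nat),
    ∃ e, (pvReachStep g)^[i] [id] = [id] ++ e := by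
  intro i
  induction i with
  | zero => exact ⟨[], rfl⟩
  | succ i ih =>
    obtain ⟨e, he⟩ := ih
    rw [Function.iterate_succ_apply']
    obtain ⟨e', he'⟩ := pvStepGrow g ((pvReachStep g)^[i] [id])
    exact ⟨e ++ e', by rw [he', he, List.append_assoc]⟩

lemma pvIterSub (g : List (Int × List Int)) (id : Int) : ∀ (i : Nat),
    ∀ x ∈ (pvReachStep g)^[i] [id], x ∈ id :: g.flatMap (fun p => p.2) := by
  intro i
  induction i with
  | zero => intro x hx; exact List.mem_cons.2 (Or.inl (List.mem_singleton.1 hx))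
  | succ i ih =>
    intro x hx
    rw [Function.iterate_succ_apply', pvMemStep] at hx
    rcases hx with h | ⟨n, _, hx⟩
    · exact ih x h
    · exact List.mem_cons_of_mem _ (pvGet?_sub g n x hx)

lemma pvIterNodup (g : List (Int × List Int)) (id : Int) : ∀ (i : Nat),
    ((pvReachStep g)^[i] [id]).Nodup := by
  intro i
  induction i with
  | zero => simp
  | succ i ih =>
    rw [Function.iterate_succ_apply']
    exact pvStepNodup g _ _ ih

lemma pvStabilize (F : List Int → List Int) (x : List Int) (B : Nat)
    (hgrow : ∀ (R : List Int), ∃ e, F R = R ++ e)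
    (hbound : ∀ i, (F^[i] x).length ≤ B)
    (hx : 0 < x.length) :
    F (F^[B] x) = F^[B] x := by
  by_cases hfix : ∃ j, j ≤ B ∧ F (F^[j] x) = F^[j] x
  · obtain ⟨j, hj, hfx⟩ := hfix
    have hpersist : ∀ k, F^[j + k] x = F^[j] x := by
      intro k
      induction k with
      | zero => rfl
      | succ k ihk =>
        rw [show j + (k+1) = (j + k) + 1 by omega, Function.iterate_succ_apply', ihk, hfx]
    have hB : F^[B] x = F^[j] x := by
      have := hpersist (B - j)
      rwa [show j + (B - j) = B by omega] at this
    rw [hB, hfx]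
  · exfalso
    push Not at hfix
    have key : ∀ i, i ≤ B + 1 → x.length + i ≤ (F^[i] x).length := by
      intro i
      induction i with
      | zero => intro _; simp
      | succ i ihi =>
        intro hi
        have h1 := ihi (by omega)
        obtain ⟨e, he⟩ := hgrow (F^[i] x)
        have hne : e ≠ [] := by
          intro rfl'
          exact hfix i (by omega) (by rw [he, rfl', List.append_nil])
        rw [Function.iterate_succ_apply', he]
        have : 0 < e.length := List.length_pos_iff.2 hne
        simp only [List.length_append]
        omega
    have := key (B + 1) (le_refl _)
    have := hbound (B + 1)
    omega

lemma pvReach_fix (g : List (Int × List Int)) (id : Int) :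
    pvReachStep g (pvReach g id) = pvReach g id := by
  apply pvStabilize (pvReachStep g) [id] ((g.flatMap (fun p => p.2)).length + 1)
  · intro R
    exact pvStepGrow g R
  · intro i
    have hsub : ∀ x ∈ (pvReachStep g)^[i] [id], x ∈ id :: g.flatMap (fun p => p.2) :=
      pvIterSub g id i
    have := List.Subperm.length_le (List.subperm_of_subset (pvIterNodup g id i) hsub)
    simpa using this
  · simp

lemma pvReach_mem_self (g : List (Int × List Int)) (id : Int) : id ∈ pvReach g id := by
  obtain ⟨e, he⟩ := pvIterGrow g id ((g.flatMap (fun p => p.2)).length + 1)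
  rw [pvReach, he]
  exact List.mem_append_left _ (List.mem_singleton.2 rfl)

lemma pvReach_closed (g : List (Int × List Int)) (id : Int) (n : Int) (hn : n ∈ pvReach g id) :
    ∀ v ∈ ((PySem.Dict.mk g).get? n).getD [], v ∈ pvReach g id := by
  intro v hv
  rw [← pvReach_fix g id, pvMemStep]
  exact Or.inr ⟨n, hn, hv⟩

lemma pvMain (g : List (Int × List Int)) (id : Int) (C : List Int)
    (hC : ∀ n ∈ C, ((PySem.Dict.mk g).get? n).isSome)
    (hCc : ∀ n ∈ C, ∀ v ∈ ((PySem.Dict.mk g).get? n).getD [], v ∈ C) :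
    ∀ (fb : Nat) (d : PySem.Dict Int Int) (f : List Int) (res : PySem.Dict Int Int) (k : Int) (fa : Nat),
    (∀ n ∈ f, n ∈ C) →
    (∀ n ∈ f, n ∈ d.keys) →
    (∀ n ∈ f, d.getD n 0 = k) →
    id ∈ d.keys →
    d.keys.Nodup →
    (∀ v ∈ (d.erase id).values, v ≤ k) →
    res = PySem.Dict.counter ((d.erase id).values) →
    f.length + pvMiss g d.keys + 1 ≤ fa →
    pvMiss g d.keys + 1 ≤ fb →
    (PySem.Dict.counter (((pvBfsA g fa d f).erase id).values)).items
      = (pvBfsB g fb d.keys f res (k+1)).items := by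
  intro fb
  induction fb with
  | zero => intro d f res k fa _ _ _ _ _ _ _ _ hfb; omega
  | succ fb ih =>
    intro d f res k fa hfC hfK hfV hid hnd hvals hres hfa hfb
    cases f with
    | nil =>
      have hA : pvBfsA g fa d [] = d := by cases fa <;> rfl
      rw [hA, hres]
      rfl
    | cons n f' =>
      -- unfold one level of B
      rw [pvBfsB]
      rw [pvLevelB g (n :: f') d.keys []]
      simp only [List.nil_append]
      set w := pvLevel g d.keys (n :: f') with hw
      -- drain one level of A
      have hcond : ∀ m ∈ (n :: f'), ((PySem.Dict.mk g).get? m).isSome ∧ m ∈ d.keys ∧ d.getD m 0 = k :=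
        fun m hm => ⟨hC m (hfC m hm), hfK m hm, hfV m hm⟩
      have hlenfa : (n :: f').length ≤ fa := by
        have := hfa; simp only [List.length_cons] at this ⊢; omega
      have hdrain := pvDrainA g (n :: f') d [] k fa hcond hnd hlenfa
      rw [List.append_nil] at hdrain
      rw [List.nil_append] at hdrain
      rw [hdrain, ← hw]
      set d₁ := PySem.Dict.mk (d.items ++ w.map (fun y => (y, k+1))) with hd₁
      have hkeys₁ : d₁.keys = d.keys ++ w := by
        simp only [hd₁, PySem.Dict.keys, List.map_append]
        congr 1
        induction w <;> simp_all
      -- the new block of values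
      have hidw : id ∉ w := fun hidw => (pvLevel_mem _ g _ id hidw).2 hid
      have hvals₁ : (d₁.erase id).values = (d.erase id).values ++ List.replicate w.length (k+1) := by
        simp only [hd₁, PySem.Dict.erase, PySem.Dict.values, List.filter_append,
          List.map_append]
        congr 1
        have hfilter : (w.map (fun y => (y, k+1))).filter (fun p => !(p.1 == id)) = w.map (fun y => (y, k+1)) := by
          apply List.filter_eq_self.2
          intro p hp
          obtain ⟨y, hy, rfl⟩ := List.mem_map.1 hp
          simp only [Bool.not_eq_eq_eq_not, Bool.not_true, beq_eq_false_iff_ne]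
          exact fun he => hidw (he ▸ hy)
        rw [hfilter]
        induction w <;> simp_all [List.replicate_succ]
      by_cases hwnil : w = []
      · -- no new nodes: both sides stop
        have hd₁d : d₁ = d := by
          apply PySem.Dict.ext; simp [hd₁, hwnil]
        rw [hwnil, hd₁d]
        have hA : pvBfsA g (fa - (n :: f').length) d [] = d := by
          cases (fa - (n :: f').length) <;> rfl
        rw [hA]
        rw [if_pos (show (List.isEmpty ([] : List Int)) = true from rfl)]
        have hB : pvBfsB g fb (d.keys ++ []) [] res (k+1+1) = res := by
          cases fb <;> rfl
        rw [hB, hres]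
      · -- a nonempty new level
        have hlem := pvLevel_mem (n :: f') g d.keys
        rw [← hw] at hlem
        have hfC' : ∀ m ∈ w, m ∈ C := by
          intro m hm
          obtain ⟨n', hn', hmn'⟩ := pvLevel_mem' (n :: f') g d.keys m (hw ▸ hm)
          exact hCc n' (hfC n' hn') m hmn'
        have hfK' : ∀ m ∈ w, m ∈ d₁.keys := by
          intro m hm; rw [hkeys₁]; exact List.mem_append_right _ hm
        have hfV' : ∀ m ∈ w, d₁.getD m 0 = k + 1 := by
          intro m hm
          unfold PySem.Dict.getD
          rw [hd₁, pvGet?_append_right d.items _ m (by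
            have := (hlem m hm).2
            simpa [PySem.Dict.keys] using this)]
          rw [pvGet?_const_block w (k+1) m hm]
          rfl
        have hid' : id ∈ d₁.keys := by rw [hkeys₁]; exact List.mem_append_left _ hid
        have hnd' : d₁.keys.Nodup := by
          rw [hkeys₁, hw]; exact pvLevel_nodup _ g _ hnd
        have hvals' : ∀ v ∈ (d₁.erase id).values, v ≤ k + 1 := by
          intro v hv
          rw [hvals₁] at hv
          rcases List.mem_append.1 hv with h1 | h2
          · exact le_trans (hvals v h1) (by omega)
          · rw [List.eq_of_mem_replicate h2]
        have hknotv : (k + 1) ∉ (d.erase id).values := fun hmem => by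
          have := hvals _ hmem; omega
        have hres' : (if (w : List Int).isEmpty then res else res.insert (k+1) (w.length : Int))
            = PySem.Dict.counter ((d₁.erase id).values) := by
          rw [if_neg (by simpa [List.isEmpty_iff] using hwnil)]
          rw [hvals₁, pvCounterBlock _ _ _ hknotv (by
            simpa [List.length_pos_iff, List.isEmpty_iff] using hwnil)]
          rw [hres]
        have hdrop : pvMiss g (d.keys ++ w) + w.length ≤ pvMiss g d.keys := by
          apply pvMiss_drop g d.keys w
          · rw [hw]; exact pvLevel_nodup _ g _ hnd
          · intro x hx; exact (hlem x hx).1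
        have hwpos : 0 < w.length := List.length_pos_iff.2 hwnil
        have hfa' : w.length + pvMiss g d₁.keys + 1 ≤ fa - (n :: f').length := by
          rw [hkeys₁]
          simp only [List.length_cons] at hfa ⊢
          omega
        have hfb' : pvMiss g d₁.keys + 1 ≤ fb := by
          rw [hkeys₁]; omega
        have := ih d₁ w _ (k+1) (fa - (n :: f').length) hfC' hfK' hfV' hid' hnd' hvals'
          hres' hfa' hfb'
        rw [← hkeys₁]
        exact this
      · simp

lemma pvGet?_isSome (g : List (Int × List Int)) (x : Int) (h : x ∈ g.map (fun p => p.1)) :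
    ((PySem.Dict.mk g).get? x).isSome := by
  obtain ⟨p, hp, hfst⟩ := List.mem_map.1 h
  simp only [PySem.Dict.get?, Option.isSome_map]
  rw [List.find?_isSome]
  exact ⟨p, hp, by simp [hfst]⟩

-- ===== VERDICT (by name: the statement is the Claim_ definition above) =====
theorem get_distances_with_bfs_spec : Claim_equal_get_distances_with_bfs := by
  intro id g _ hpre
  unfold Spec_get_distances_with_bfs
  have hd0 : (PySem.Dict.empty : PySem.Dict Int Int).insert id 0 = PySem.Dict.mk [(id, 0)] := by
    simp [PySem.Dict.insert, PySem.Dict.contains, PySem.Dict.empty]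
  have hkeys0 : (PySem.Dict.mk [(id, 0)] : PySem.Dict Int Int).keys = [id] := by
    simp [PySem.Dict.keys]
  have hvis0 : PySem.Set.add PySem.Set.empty id = [id] := rfl
  have hidC : id ∈ pvReach g id := pvReach_mem_self g id
  have hC : ∀ n ∈ pvReach g id, ((PySem.Dict.mk g).get? n).isSome :=
    fun n hn => pvGet?_isSome g n (hpre n hn)
  have hMbound : pvMiss g [id] ≤ (g.map (fun p => p.2.length)).sum := by
    unfold pvMiss
    calc (g.flatMap (fun p => p.2)).countP (fun v => decide (v ∉ [id]))
        ≤ (g.flatMap (fun p => p.2)).length := List.countP_le_length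
      _ = (g.map (fun p => p.2.length)).sum := by
          rw [List.length_flatMap]
  have hmain := pvMain g id (pvReach g id) hC (pvReach_closed g id)
    ((g.map (fun p => p.2.length)).sum + 2)
    (PySem.Dict.mk [(id, 0)]) [id] PySem.Dict.empty 0
    ((g.map (fun p => p.2.length)).sum + 2)
    (by intro n hn; rw [List.mem_singleton.1 hn]; exact hidC)
    (by intro n hn; rw [List.mem_singleton.1 hn, hkeys0]; exact List.mem_singleton.2 rfl)
    (by intro n hn; rw [List.mem_singleton.1 hn]; simp [PySem.Dict.getD, PySem.Dict.get?])
    (by rw [hkeys0]; exact List.mem_singleton.2 rfl)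
    (by rw [hkeys0]; exact List.nodup_singleton id)
    (by intro v hv; simp [PySem.Dict.erase, PySem.Dict.values] at hv)
    (by simp [PySem.Dict.erase, PySem.Dict.values]; rfl)
    (by rw [hkeys0]; simp only [List.length_singleton]; omega)
    (by rw [hkeys0]; omega)
  unfold get_distances_with_bfs get_distances_with_bfs_alt
  simp only [hd0, hvis0]
  rw [← hkeys0]
  exact hmain
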